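-- pv_equiv track=rewrite | github.com/LeeKilHwan/Algorithm_study | Programmers/01/20220120/82612/82612.py | solution
-- ===== SOURCE A (Python) =====
-- def solution(price, money, count):
--     answer = -1
--     for cnt in range(1, count + 1):
--         money = money - (price * cnt)
--     if money >=0 :
--         answer = 0
--     else:
--         answer = abs(money)
--     return answer
-- ===== SOURCE B (Python) =====
-- def solution(price, money, count):
--     n = count if count > 0 else 0
--     total = price * n * (n + 1) // 2
--     shortfall = total - money
--     return shortfall if shortfall > 0 else 0
-- ===== Notes on version B (the rewrite author's own statement) =====
-- stated objective: faster
-- what changed: replaces the O(count) subtraction loop by the closed-form arithmetic series price*count*(count+1)//2 and returns the positive part of the shortfall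
import Mathlib
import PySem

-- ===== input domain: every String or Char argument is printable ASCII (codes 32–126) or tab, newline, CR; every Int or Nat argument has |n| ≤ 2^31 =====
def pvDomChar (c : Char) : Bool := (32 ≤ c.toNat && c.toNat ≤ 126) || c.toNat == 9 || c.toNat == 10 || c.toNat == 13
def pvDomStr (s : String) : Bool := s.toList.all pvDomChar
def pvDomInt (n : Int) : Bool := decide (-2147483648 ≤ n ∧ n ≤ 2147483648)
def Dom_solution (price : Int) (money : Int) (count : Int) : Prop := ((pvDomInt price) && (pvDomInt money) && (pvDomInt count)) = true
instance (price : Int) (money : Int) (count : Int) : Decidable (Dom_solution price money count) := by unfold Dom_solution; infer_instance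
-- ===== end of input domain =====

-- B replaces A's O(count) subtraction loop by the closed-form arithmetic series (faster, O(1)).

-- ===== PORT A =====
def solution (price : Int) (money : Int) (count : Int) : Int :=
  -- answer = -1; for cnt in range(1, count+1): money = money - price*cnt
  let money := (PySem.List.pyRange 1 (count + 1) 1).foldl (fun m cnt => m - price * cnt) money
  if money ≥ 0 then 0 else |money|

-- ===== PORT B =====
def solution_alt (price : Int) (money : Int) (count : Int) : Int :=
  let n := if count > 0 then count else 0
  let total := PySem.Int.floordiv (price * n * (n + 1)) 2
  let shortfall := total - money
  if shortfall > 0 then shortfall else 0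

-- ===== PRECONDITION & SPEC =====
def Spec_solution (price : Int) (money : Int) (count : Int) (out : Int) : Prop := out = solution_alt price money count
instance (price : Int) (money : Int) (count : Int) (out : Int) : Decidable (Spec_solution price money count out) := by unfold Spec_solution; infer_instance

-- ===== CLAIM (what is proved, stated in full; the proofs are below) =====
def Claim_equal_solution : Prop := ∀ (price : Int) (money : Int) (count : Int), Dom_solution price money count → Spec_solution price money count (solution price money count)

-- ===== LEMMAS AND PROOFS =====

-- The subtraction loop equals subtracting price times the triangular number n*(n+1)/2.
theorem pv_loop_eq (price : Int) (n : Nat) : ∀ money : Int,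
    (PySem.List.pyRange 1 ((n : Int) + 1) 1).foldl (fun m cnt => m - price * cnt) money
      = money - price * ((n : Int) * ((n : Int) + 1) / 2) := by
  induction n with
  | zero =>
    intro money
    rw [PySem.List.pyRange_one_eq_nil (by norm_num)]
    simp
  | succ n ih =>
    intro money
    have h : PySem.List.pyRange 1 ((↑(n + 1) : Int) + 1) 1
        = PySem.List.pyRange 1 ((n : Int) + 1) 1 ++ [((n : Int) + 1)] := by
      have := PySem.List.pyRange_one_succ_right (a := 1) (b := (n : Int) + 1) (by omega)
      push_cast
      push_cast at this
      convert this using 2 <;> ring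
    rw [h, List.foldl_append, ih]
    have htri : ((↑(n + 1) : Int)) * ((↑(n + 1) : Int) + 1) / 2
        = (n : Int) * ((n : Int) + 1) / 2 + ((n : Int) + 1) := by
      have e : ((↑(n + 1) : Int)) * ((↑(n + 1) : Int) + 1)
          = (n : Int) * ((n : Int) + 1) + ((n : Int) + 1) * 2 := by push_cast; ring
      rw [e, Int.add_mul_ediv_right _ _ (by norm_num)]
    simp only [List.foldl_cons, List.foldl_nil]
    rw [htri]
    ring

theorem pv_fdiv_two (x : Int) : PySem.Int.floordiv x 2 = x / 2 := by
  simp [PySem.Int.floordiv, Int.fdiv_eq_ediv]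

-- ===== VERDICT (by name: the statement is the Claim_ definition above) =====
theorem solution_spec : Claim_equal_solution := by
  intro price money count _
  unfold Spec_solution solution solution_alt
  by_cases hc : count > 0
  · simp only [if_pos hc]
    obtain ⟨n, hn⟩ : ∃ n : Nat, count = (n : Int) :=
      ⟨count.toNat, (Int.toNat_of_nonneg (le_of_lt hc)).symm⟩
    subst hn
    rw [pv_loop_eq, pv_fdiv_two]
    have heven : (2 : Int) ∣ (n : Int) * ((n : Int) + 1) := (Int.even_mul_succ_self (n : Int)).two_dvd
    obtain ⟨k, hk⟩ := heven
    have h1 : (n : Int) * ((n : Int) + 1) / 2 = k := by rw [hk]; exact Int.mul_ediv_cancel_left _ (by norm_num)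
    have h2 : price * (n : Int) * ((n : Int) + 1) / 2 = price * k := by
      rw [mul_assoc, hk, ← mul_assoc, mul_comm price 2, mul_assoc]
      exact Int.mul_ediv_cancel_left _ (by norm_num)
    rw [h1, h2]
    rcases le_or_gt 0 (money - price * k) with h | h
    · rw [if_pos h, if_neg (by omega)]
    · rw [if_neg (by omega), if_pos (by omega), abs_of_neg h]
      ring
  · rw [PySem.List.pyRange_one_eq_nil (by omega), if_neg hc]
    simp only [List.foldl_nil, mul_zero, zero_mul]
    rw [pv_fdiv_two]
    norm_num
    rcases le_or_gt 0 money with h | h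
    · rw [if_pos h, if_neg (by omega)]
    · rw [if_neg (by omega), if_pos (by omega), abs_of_neg h]
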